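-- pv_equiv track=rewrite | github.com/atlas0fd00m/CanCat | cancat/__init__.py | hasAscii
-- ===== SOURCE A (Python) =====
-- def hasAscii(msg, minbytes=3, strict=False):
--     '''
--     if minbytes == -1, every character has to be clean ASCII
--     otherwise, look for strings of at least minbytes in length
--     '''
--     ascii_match = 0
--     ascii_count = 0
--     for byte in msg:
--         if 0x20 <= byte < 0x7f:
--             ascii_count +=1
--             if ascii_count >= minbytes:
--                 ascii_match = 1
--         else:
--             if strict:
--                 return 0
--
--             ascii_count = 0
--     return ascii_match
-- ===== SOURCE B (Python) =====
-- def hasAscii(msg, minbytes=3, strict=False):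
--     bad = [i for i, b in enumerate(msg) if not (0x20 <= b < 0x7f)]
--     if strict and bad:
--         return 0
--     bounds = [-1] + bad + [len(msg)]
--     longest = max(b - a - 1 for a, b in zip(bounds, bounds[1:]))
--     return 1 if longest >= max(minbytes, 1) else 0
-- ===== Notes on version B (the rewrite author's own statement) =====
-- stated objective: alternative
-- what changed: Replaced A's running-counter state machine by index arithmetic: B collects the positions of non-printable bytes, adds sentinels -1 and len(msg), and decides from the maximum gap between consecutive delimiter positions (gap-1 = run length) against max(minbytes,1); strict mode is just 'no bad positions'.
import Mathlib
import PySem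

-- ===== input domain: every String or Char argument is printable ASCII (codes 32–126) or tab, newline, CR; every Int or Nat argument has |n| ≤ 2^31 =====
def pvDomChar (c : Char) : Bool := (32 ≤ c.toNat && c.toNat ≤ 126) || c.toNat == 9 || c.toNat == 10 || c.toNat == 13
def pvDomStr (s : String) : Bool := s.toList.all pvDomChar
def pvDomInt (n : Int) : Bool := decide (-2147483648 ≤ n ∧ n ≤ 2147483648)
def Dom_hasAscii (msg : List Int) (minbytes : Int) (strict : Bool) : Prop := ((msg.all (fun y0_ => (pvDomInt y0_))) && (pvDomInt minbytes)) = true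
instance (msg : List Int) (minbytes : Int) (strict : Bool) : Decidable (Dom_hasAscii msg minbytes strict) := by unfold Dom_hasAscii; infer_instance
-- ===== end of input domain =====

-- B replaces A's running-counter scan by index arithmetic: it collects the positions of
-- non-printable bytes and takes the maximum gap between consecutive delimiters (with
-- sentinels -1 and len msg); alternative decomposition, no run counting at all.

-- ===== PORT A =====
-- the for-loop of A, carrying (ascii_match, ascii_count)
def hasAsciiGo (minbytes : Int) (strict : Bool) : List Int → Int → Int → Int
  | [], am, _ => am
  | b :: rest, am, ac =>
    if 32 ≤ b ∧ b < 127 then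
      hasAsciiGo minbytes strict rest (if minbytes ≤ ac + 1 then 1 else am) (ac + 1)
    else
      if strict then 0 else hasAsciiGo minbytes strict rest am 0

def hasAscii (msg : List Int) (minbytes : Int) (strict : Bool) : Int :=
  hasAsciiGo minbytes strict msg 0 0

-- ===== PORT B =====
def pvPrintable (b : Int) : Bool := decide (32 ≤ b ∧ b < 127)

-- bad = [i for i, b in enumerate(msg) if not (0x20 <= b < 0x7f)]
def pvBadIdx (msg : List Int) : List Int :=
  ((PySem.List.enumerate msg).filter (fun p => !pvPrintable p.2)).map (fun p => p.1)

-- (b - a - 1 for a, b in zip(bounds, bounds[1:])) with running previous element a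
def pvGaps : Int → List Int → List Int
  | _, [] => []
  | p, x :: r => (x - p - 1) :: pvGaps x r

-- max(...) over a (always nonempty) list
def pvMaxOf : List Int → Int
  | [] => 0            -- unreachable: the gaps list always ends at the sentinel len(msg)
  | x :: r => r.foldl max x

def hasAscii_alt (msg : List Int) (minbytes : Int) (strict : Bool) : Int :=
  let bad := pvBadIdx msg
  if strict && !bad.isEmpty then 0
  else
    let longest := pvMaxOf (pvGaps (-1) (bad ++ [(msg.length : Int)]))
    if max minbytes 1 ≤ longest then 1 else 0

-- ===== PRECONDITION & SPEC =====
def Spec_hasAscii (msg : List Int) (minbytes : Int) (strict : Bool) (out : Int) : Prop := out = hasAscii_alt msg minbytes strict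
instance (msg : List Int) (minbytes : Int) (strict : Bool) (out : Int) : Decidable (Spec_hasAscii msg minbytes strict out) := by unfold Spec_hasAscii; infer_instance

-- ===== CLAIM =====
def Claim_equal_hasAscii : Prop := ∀ (msg : List Int) (minbytes : Int) (strict : Bool), Dom_hasAscii msg minbytes strict → Spec_hasAscii msg minbytes strict (hasAscii msg minbytes strict)

-- ===== LEMMAS AND PROOFS =====

-- bestFrom msg c: the longest printable run if c printable bytes are already in progress
def bestFrom : List Int → Int → Int
  | [], c => c
  | b :: r, c => if 32 ≤ b ∧ b < 127 then bestFrom r (c + 1) else max c (bestFrom r 0)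

theorem goA_cons (mb : Int) (s : Bool) (b : Int) (r : List Int) (m c : Int) :
    hasAsciiGo mb s (b :: r) m c
      = if 32 ≤ b ∧ b < 127 then
          hasAsciiGo mb s r (if mb ≤ c + 1 then 1 else m) (c + 1)
        else if s then 0 else hasAsciiGo mb s r m 0 := rfl

theorem bestFrom_cons (b : Int) (r : List Int) (c : Int) :
    bestFrom (b :: r) c
      = if 32 ≤ b ∧ b < 127 then bestFrom r (c + 1) else max c (bestFrom r 0) := rfl

theorem le_bestFrom (msg : List Int) (c : Int) : c ≤ bestFrom msg c := by
  induction msg generalizing c with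
  | nil => simp [bestFrom]
  | cons b r ih =>
    rw [bestFrom_cons]
    split
    · exact le_trans (by omega) (ih (c + 1))
    · exact le_max_left _ _

theorem goA_eq (minbytes : Int) (msg : List Int) (m c : Int)
    (hc : 0 ≤ c) (hm : m = 1 ∨ (m = 0 ∧ c < max minbytes 1)) :
    hasAsciiGo minbytes false msg m c
      = if m = 1 ∨ max minbytes 1 ≤ bestFrom msg c then 1 else 0 := by
  induction msg generalizing m c with
  | nil =>
    show m = if m = 1 ∨ max minbytes 1 ≤ c then 1 else 0
    rcases hm with h | ⟨h0, hlt⟩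
    · simp [h]
    · subst h0
      rw [if_neg (by omega)]
  | cons b r ih =>
    rw [goA_cons, bestFrom_cons]
    by_cases hb : 32 ≤ b ∧ b < 127
    · rw [if_pos hb, if_pos hb]
      by_cases hmb : minbytes ≤ c + 1
      · rw [if_pos hmb]
        rw [ih 1 (c + 1) (by omega) (Or.inl rfl)]
        have hbf : max minbytes 1 ≤ bestFrom r (c + 1) :=
          le_trans (by omega) (le_bestFrom r (c + 1))
        rw [if_pos (Or.inr hbf), if_pos (Or.inr hbf)]
      · rw [if_neg hmb]
        exact ih m (c + 1) (by omega)
          (by rcases hm with h | ⟨h0, _⟩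
              · exact Or.inl h
              · exact Or.inr ⟨h0, by omega⟩)
    · rw [if_neg hb, if_neg hb, if_neg (by decide : ¬ (false = true))]
      rw [ih m 0 le_rfl
          (by rcases hm with h | ⟨h0, _⟩
              · exact Or.inl h
              · exact Or.inr ⟨h0, by omega⟩)]
      have heq : (m = 1 ∨ max minbytes 1 ≤ bestFrom r 0)
          ↔ (m = 1 ∨ max minbytes 1 ≤ max c (bestFrom r 0)) := by
        constructor
        · rintro (h | h)
          · exact Or.inl h
          · exact Or.inr (le_max_of_le_right h)
        · rintro (h | h)
          · exact Or.inl h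
          · rcases le_max_iff.mp h with h' | h'
            · rcases hm with hm1 | ⟨_, hlt⟩
              · exact Or.inl hm1
              · omega
            · exact Or.inr h'
      by_cases h : m = 1 ∨ max minbytes 1 ≤ bestFrom r 0
      · rw [if_pos h, if_pos (heq.mp h)]
      · rw [if_neg h, if_neg (fun hh => h (heq.mpr hh))]

theorem goA_strict_all (minbytes : Int) (msg : List Int) (m c : Int)
    (h : msg.all pvPrintable = true) :
    hasAsciiGo minbytes true msg m c = hasAsciiGo minbytes false msg m c := by
  induction msg generalizing m c with
  | nil => rfl
  | cons b r ih =>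
    simp only [List.all_cons, Bool.and_eq_true] at h
    have hb : 32 ≤ b ∧ b < 127 := by simpa [pvPrintable] using h.1
    rw [goA_cons, goA_cons, if_pos hb, if_pos hb]
    exact ih _ _ h.2

theorem goA_strict_not (minbytes : Int) (msg : List Int) (m c : Int)
    (h : msg.all pvPrintable = false) :
    hasAsciiGo minbytes true msg m c = 0 := by
  induction msg generalizing m c with
  | nil => simp at h
  | cons b r ih =>
    by_cases hb : 32 ≤ b ∧ b < 127
    · have hb' : pvPrintable b = true := by simp [pvPrintable, hb]
      have hr : r.all pvPrintable = false := by
        simpa [List.all_cons, hb'] using h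
      rw [goA_cons, if_pos hb]
      exact ih _ _ hr
    · rw [goA_cons, if_neg hb, if_pos rfl]

-- generalized bad-index list starting the enumeration at s
def badIdxFrom (s : Int) (msg : List Int) : List Int :=
  ((PySem.List.enumerate msg s).filter (fun p => !pvPrintable p.2)).map (fun p => p.1)

theorem badIdxFrom_cons (s b : Int) (r : List Int) :
    badIdxFrom s (b :: r)
      = if pvPrintable b then badIdxFrom (s + 1) r else s :: badIdxFrom (s + 1) r := by
  unfold badIdxFrom
  rw [PySem.List.enumerate_cons]
  cases h : pvPrintable b <;> simp [h]

theorem pvBadIdx_eq (msg : List Int) : pvBadIdx msg = badIdxFrom 0 msg := rfl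

theorem foldl_max_max (l : List Int) (a b : Int) :
    l.foldl max (max a b) = max a (l.foldl max b) := by
  induction l generalizing b with
  | nil => rfl
  | cons x r ih =>
    simp only [List.foldl_cons]
    rw [max_assoc, ih]

theorem pvMaxOf_cons (x y : Int) (l : List Int) :
    pvMaxOf (x :: y :: l) = max x (pvMaxOf (y :: l)) := by
  simp only [pvMaxOf, List.foldl_cons]
  exact foldl_max_max l x y

theorem pvGaps_ne_nil (p : Int) (l : List Int) (x : Int) :
    pvGaps p (l ++ [x]) ≠ [] := by
  cases l <;> simp [pvGaps]

-- the key bridge: max gap between delimiters = longest printable run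
theorem maxGap_eq_bestFrom (msg : List Int) (s c : Int) :
    pvMaxOf (pvGaps (s - c - 1) (badIdxFrom s msg ++ [s + (msg.length : Int)]))
      = bestFrom msg c := by
  induction msg generalizing s c with
  | nil =>
    show pvMaxOf [s + 0 - (s - c - 1) - 1] = c
    simp [pvMaxOf]
    omega
  | cons b r ih =>
    rw [badIdxFrom_cons, bestFrom_cons]
    by_cases hb : 32 ≤ b ∧ b < 127
    · have hb' : pvPrintable b = true := by simp [pvPrintable, hb]
      rw [if_pos hb', if_pos hb]
      have : s - c - 1 = (s + 1) - (c + 1) - 1 := by ring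
      rw [this]
      have hlen : s + ((b :: r).length : Int) = (s + 1) + (r.length : Int) := by
        simp [List.length_cons]; ring
      rw [hlen, ih (s + 1) (c + 1)]
    · have hb' : pvPrintable b = false := by simp [pvPrintable]; omega
      rw [if_neg (by simp [hb']), if_neg hb]
      have hlen : s + ((b :: r).length : Int) = (s + 1) + (r.length : Int) := by
        simp [List.length_cons]; ring
      rw [List.cons_append, hlen]
      have hrec : pvGaps (s - c - 1) (s :: (badIdxFrom (s + 1) r ++ [(s + 1) + (r.length : Int)]))
          = (s - (s - c - 1) - 1) :: pvGaps s (badIdxFrom (s + 1) r ++ [(s + 1) + (r.length : Int)]) := rfl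
      rw [hrec]
      have hc : s - (s - c - 1) - 1 = c := by ring
      rw [hc]
      have hrew : pvMaxOf (pvGaps s (badIdxFrom (s + 1) r ++ [(s + 1) + (r.length : Int)]))
          = bestFrom r 0 := by
        have := ih (s + 1) 0
        have hsn : s + 1 - 0 - 1 = s := by ring
        rw [hsn] at this
        exact this
      cases hg : pvGaps s (badIdxFrom (s + 1) r ++ [(s + 1) + (r.length : Int)]) with
      | nil => exact absurd hg (pvGaps_ne_nil _ _ _)
      | cons y l =>
        rw [pvMaxOf_cons]
        rw [← hg, hrew]

theorem badIdxFrom_empty_iff (s : Int) (msg : List Int) :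
    (badIdxFrom s msg).isEmpty = msg.all pvPrintable := by
  induction msg generalizing s with
  | nil => rfl
  | cons b r ih =>
    rw [badIdxFrom_cons, List.all_cons]
    cases h : pvPrintable b
    · simp
    · simpa using ih (s + 1)

-- ===== VERDICT =====
theorem hasAscii_spec : Claim_equal_hasAscii := by
  intro msg minbytes strict _
  show hasAscii msg minbytes strict = hasAscii_alt msg minbytes strict
  have hlong : pvMaxOf (pvGaps (-1) (pvBadIdx msg ++ [(msg.length : Int)]))
      = bestFrom msg 0 := by
    rw [pvBadIdx_eq]
    have := maxGap_eq_bestFrom msg 0 0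
    simpa using this
  have hbase : hasAsciiGo minbytes false msg 0 0
      = if max minbytes 1 ≤ bestFrom msg 0 then 1 else 0 := by
    rw [goA_eq minbytes msg 0 0 le_rfl (Or.inr ⟨rfl, by omega⟩)]
    simp
  cases strict with
  | false =>
    rw [hasAscii, hbase, hasAscii_alt]
    simp [hlong]
  | true =>
    cases hall : msg.all pvPrintable with
    | false =>
      have hne : (pvBadIdx msg).isEmpty = false := by
        rw [pvBadIdx_eq, badIdxFrom_empty_iff, hall]
      rw [hasAscii, goA_strict_not minbytes msg 0 0 hall, hasAscii_alt]
      simp [hne]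
    | true =>
      have hne : (pvBadIdx msg).isEmpty = true := by
        rw [pvBadIdx_eq, badIdxFrom_empty_iff, hall]
      rw [hasAscii, goA_strict_all minbytes msg 0 0 hall, hbase, hasAscii_alt]
      simp [hne, hlong]
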